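-- pv_equiv track=rewrite | github.com/aman2000jaiswal14/temptemp | app.py | encodePass
-- ===== SOURCE A (Python) =====
-- range1 = (97, 122)
--
-- range2 = (65, 90)
--
-- range3 = (48, 57)
--
-- def encodePass(pas):
--     usermapper = {'@': '+', '+': '@', '$': '*', '*': '$', '&': '^', '^': '&', '#': '%', '%': '#'}
--     user = pas
--     encode = ''
--     for i in user:
--         onebit = 0
--         twobit = 0
--         non = 0
--         val = i
--         if (range1[0] <= ord(i) <= range1[1]):
--             onebit = 0
--             if (range1[0] <= ord(i) <= range1[0] + 12):
--                 twobit = 0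
--             else:
--                 i = chr(range1[0] + range1[1] - ord(i))
--
--                 twobit = 1
--         elif (range2[0] <= ord(i) <= range2[1]):
--             onebit = 1
--             i = i.lower()
--             if (range1[0] <= ord(i) <= range1[0] + 12):
--                 twobit = 0
--             else:
--                 i = chr(range1[0] + range1[1] - ord(i))
--                 twobit = 1
--         elif (range3[0] <= ord(i) <= range3[1]):
--             onebit = 2
--             i = int(i)
--             i = 9 - i
--             i = str(i)
--         else:
--             non = 1
--             if (i in usermapper):
--                 i = usermapper[i]
--
--         if (non):
--             encode += i
--         else:
--             encode += (i + str(onebit) + str(twobit))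
--
--     return encode
-- ===== SOURCE B (Python) =====
-- # B: precompute a translate table once; encodePass is a single str.translate call.
-- def _build_table():
--     table = {}
--     # lowercase a-z: onebit 0; a..m keep, n..z reflect (twobit 1)
--     for o in range(97, 123):
--         if o <= 109:
--             table[o] = chr(o) + '00'
--         else:
--             table[o] = chr(97 + 122 - o) + '01'
--     # uppercase A-Z: onebit 1; lowered first
--     for o in range(65, 91):
--         low = o + 32
--         if low <= 109:
--             table[o] = chr(low) + '10'
--         else:
--             table[o] = chr(97 + 122 - low) + '11'
--     # digits: onebit 2, twobit 0, value 9-d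
--     for o in range(48, 58):
--         table[o] = str(9 - (o - 48)) + '20'
--     # symbol swaps (no suffix)
--     for a, b in (('@', '+'), ('+', '@'), ('$', '*'), ('*', '$'),
--                  ('&', '^'), ('^', '&'), ('#', '%'), ('%', '#')):
--         table[ord(a)] = b
--     return table
--
-- _TABLE = _build_table()
--
-- def encodePass(pas):
--     return pas.translate(_TABLE)
-- ===== Notes on version B (the rewrite author's own statement) =====
-- stated objective: faster
-- what changed: A decides each character with a four-way branch cascade executed per character; B precomputes a translation table (ordinal -> replacement string) once and encodes with a single str.translate call, unmapped characters passing through.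
import Mathlib
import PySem

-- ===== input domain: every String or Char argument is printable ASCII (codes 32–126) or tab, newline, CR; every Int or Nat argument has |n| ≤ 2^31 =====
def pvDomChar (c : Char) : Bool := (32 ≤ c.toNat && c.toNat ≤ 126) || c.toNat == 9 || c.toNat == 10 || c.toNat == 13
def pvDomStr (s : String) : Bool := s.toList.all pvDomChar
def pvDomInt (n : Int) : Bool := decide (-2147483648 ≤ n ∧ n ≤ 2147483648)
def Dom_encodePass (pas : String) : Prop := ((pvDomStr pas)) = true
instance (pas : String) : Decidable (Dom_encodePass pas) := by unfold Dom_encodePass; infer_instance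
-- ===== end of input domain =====

-- B replaces A's per-character branch cascade by a translation table built once
-- and a single table-lookup pass (idiomatic str.translate); return values are equal.

-- ===== PORT A =====
-- one iteration of A's loop, verbatim; `int(i)` on a digit char is (i.toNat - 48 : Int),
-- exact because the branch guard guarantees i is '0'..'9'
def encodePassLoop (usermapper : PySem.Dict Char String) (encode : String) (i : Char) : String :=
  if 97 ≤ i.toNat ∧ i.toNat ≤ 122 then
    let onebit : Int := 0
    if 97 ≤ i.toNat ∧ i.toNat ≤ 97 + 12 then
      let twobit : Int := 0
      encode ++ (String.singleton i ++ PySem.Int.toStr onebit ++ PySem.Int.toStr twobit)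
    else
      let i' := Char.ofNat (97 + 122 - i.toNat)
      let twobit : Int := 1
      encode ++ (String.singleton i' ++ PySem.Int.toStr onebit ++ PySem.Int.toStr twobit)
  else if 65 ≤ i.toNat ∧ i.toNat ≤ 90 then
    let onebit : Int := 1
    let i := PySem.Chars.lowerChar i
    if 97 ≤ i.toNat ∧ i.toNat ≤ 97 + 12 then
      let twobit : Int := 0
      encode ++ (String.singleton i ++ PySem.Int.toStr onebit ++ PySem.Int.toStr twobit)
    else
      let i' := Char.ofNat (97 + 122 - i.toNat)
      let twobit : Int := 1
      encode ++ (String.singleton i' ++ PySem.Int.toStr onebit ++ PySem.Int.toStr twobit)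
  else if 48 ≤ i.toNat ∧ i.toNat ≤ 57 then
    let onebit : Int := 2
    let n : Int := (i.toNat : Int) - 48
    let n := 9 - n
    let s := PySem.Int.toStr n
    encode ++ (s ++ PySem.Int.toStr onebit ++ PySem.Int.toStr (0 : Int))
  else
    match usermapper.get? i with
    | some v => encode ++ v
    | none => encode ++ String.singleton i

def encodePass (pas : String) : String :=
  let usermapper : PySem.Dict Char String := PySem.Dict.ofList
    [('@', "+"), ('+', "@"), ('$', "*"), ('*', "$"), ('&', "^"), ('^', "&"), ('#', "%"), ('%', "#")]
  pas.toList.foldl (encodePassLoop usermapper) ""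

-- ===== PORT B =====
-- the translation table of Source B: ordinal (as Int, like Python's ord key) ↦ replacement string
def pvTable_encodePass : PySem.Dict Int String :=
  let t := (PySem.List.pyRange 97 123 1).foldl (fun t o =>
    if o ≤ 109 then t.insert o (String.singleton (Char.ofNat o.toNat) ++ "00")
    else t.insert o (String.singleton (Char.ofNat (97 + 122 - o).toNat) ++ "01")) PySem.Dict.empty
  let t := (PySem.List.pyRange 65 91 1).foldl (fun t o =>
    let low := o + 32
    if low ≤ 109 then t.insert o (String.singleton (Char.ofNat low.toNat) ++ "10")
    else t.insert o (String.singleton (Char.ofNat (97 + 122 - low).toNat) ++ "11")) t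
  let t := (PySem.List.pyRange 48 58 1).foldl (fun t o =>
    t.insert o (PySem.Int.toStr (9 - (o - 48)) ++ "20")) t
  ([('@', '+'), ('+', '@'), ('$', '*'), ('*', '$'),
    ('&', '^'), ('^', '&'), ('#', '%'), ('%', '#')] : List (Char × Char)).foldl
    (fun t p => t.insert (p.1.toNat : Int) (String.singleton p.2)) t

-- str.translate: each char is replaced by its table entry, chars without entry pass through
def encodePass_alt (pas : String) : String :=
  String.join (pas.toList.map (fun c =>
    pvTable_encodePass.getD (c.toNat : Int) (String.singleton c)))

-- ===== PRECONDITION & SPEC =====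
def Spec_encodePass (pas : String) (out : String) : Prop := out = encodePass_alt pas
instance (pas : String) (out : String) : Decidable (Spec_encodePass pas out) := by unfold Spec_encodePass; infer_instance

-- ===== CLAIM (what is proved, stated in full; the proofs are below) =====
def Claim_equal_encodePass : Prop := ∀ (pas : String), Dom_encodePass pas → Spec_encodePass pas (encodePass pas)

-- ===== LEMMAS AND PROOFS =====
set_option maxRecDepth 100000

-- A's per-character output (the loop body without the accumulator)
def pvStepA (i : Char) : String :=
  encodePassLoop (PySem.Dict.ofList
    [('@', "+"), ('+', "@"), ('$', "*"), ('*', "$"), ('&', "^"), ('^', "&"), ('#', "%"), ('%', "#")]) "" i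

-- B's per-character output
def pvStepB (c : Char) : String :=
  pvTable_encodePass.getD (c.toNat : Int) (String.singleton c)

theorem pvLoop_eq (um : PySem.Dict Char String) (e : String) (i : Char) :
    encodePassLoop um e i = e ++ encodePassLoop um "" i := by
  unfold encodePassLoop
  by_cases h1 : 97 ≤ i.toNat ∧ i.toNat ≤ 122
  · by_cases h2 : 97 ≤ i.toNat ∧ i.toNat ≤ 97 + 12 <;>
      simp [h1, h2, String.append_assoc] <;> (try (split_ifs <;> rfl))

  · by_cases h2 : 65 ≤ i.toNat ∧ i.toNat ≤ 90
    · by_cases h3 : 97 ≤ (PySem.Chars.lowerChar i).toNat ∧ (PySem.Chars.lowerChar i).toNat ≤ 97 + 12 <;>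
        simp [h1, h2, h3, String.append_assoc]
    · by_cases h4 : 48 ≤ i.toNat ∧ i.toNat ≤ 57
      · simp [h1, h2, h4, String.append_assoc]
      · simp only [h1, h2, h4, if_false]
        cases um.get? i with
        | none => simp only []; exact (String.append_left_inj e).mp rfl
        | some v => simp

theorem pvJoin_cons (s : String) (t : List String) :
    String.join (s :: t) = s ++ String.join t := by
  have aux : ∀ (t : List String) (x : String), t.foldl (· ++ ·) x = x ++ t.foldl (· ++ ·) "" := by
    intro t
    induction t with
    | nil => intro x; simp
    | cons b t ih =>
      intro x
      simp only [List.foldl_cons]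
      rw [ih (x ++ b), ih ("" ++ b)]
      simp [String.append_assoc]
  simp only [String.join, List.foldl_cons]
  rw [aux t ("" ++ s)]
  simp

theorem pvFoldA (um : PySem.Dict Char String) (l : List Char) (acc : String) :
    l.foldl (encodePassLoop um) acc = acc ++ String.join (l.map (encodePassLoop um "")) := by
  induction l generalizing acc with
  | nil => simp [String.join]
  | cons a t ih =>
    simp only [List.foldl_cons, List.map_cons]
    rw [ih, pvLoop_eq, pvJoin_cons, String.append_assoc]

theorem encodePass_eq_join (pas : String) :
    encodePass pas = String.join (pas.toList.map pvStepA) := by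
  unfold encodePass pvStepA
  rw [pvFoldA]
  simp

theorem pvStep_eq (c : Char) (h : pvDomChar c = true) : pvStepA c = pvStepB c := by
  have hlt : c.toNat < 127 := by
    unfold pvDomChar at h
    simp only [Bool.or_eq_true, Bool.and_eq_true, decide_eq_true_eq, beq_iff_eq] at h
    omega
  have key : ∀ n, n < 127 → pvStepA (Char.ofNat n) = pvStepB (Char.ofNat n) := by decide
  have := key c.toNat hlt
  rwa [Char.ofNat_toNat] at this

-- ===== VERDICT (by name: the statement is the Claim_ definition above) =====
theorem encodePass_spec : Claim_equal_encodePass := by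
  intro pas hdom
  unfold Spec_encodePass
  rw [encodePass_eq_join]
  unfold encodePass_alt
  congr 1
  apply List.map_congr_left
  intro c hc
  have hcd : pvDomChar c = true := by
    have := hdom
    unfold Dom_encodePass pvDomStr at this
    exact List.all_eq_true.mp this c hc
  exact pvStep_eq c hcd
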